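-- pv_equiv track=rewrite | github.com/kwameasare/loop | tools/build_tracker.py | _rollup_status
-- ===== SOURCE A (Python) =====
-- def _rollup_status(statuses: list[str]) -> str:
--     """Roll a list of child statuses up to a single parent status."""
--     if not statuses:
--         return "Not started"
--     counts: dict[str, int] = {}
--     for s in statuses:
--         counts[s] = counts.get(s, 0) + 1
--     total = len(statuses)
--     if counts.get("Done", 0) == total:
--         return "Done"
--     if counts.get("Not started", 0) == total:
--         return "Not started"
--     if counts.get("Blocked", 0) == total:
--         return "Blocked"
--     if counts.get("Cancelled", 0) == total:
--         return "Cancelled"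
--     return "In progress"
-- ===== SOURCE B (Python) =====
-- def _rollup_status(statuses: list[str]) -> str:
--     """Roll a list of child statuses up to a single parent status."""
--     if not statuses:
--         return "Not started"
--     first = statuses[0]
--     if all(s == first for s in statuses) and first in ("Done", "Not started", "Blocked", "Cancelled"):
--         return first
--     return "In progress"
-- ===== Notes on version B (the rewrite author's own statement) =====
-- stated objective: simpler
-- what changed: Replaces the frequency dictionary and four count-vs-total comparisons with a single short-circuiting all-equal-to-first scan plus one membership test in the four-name tuple.
import Mathlib
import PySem

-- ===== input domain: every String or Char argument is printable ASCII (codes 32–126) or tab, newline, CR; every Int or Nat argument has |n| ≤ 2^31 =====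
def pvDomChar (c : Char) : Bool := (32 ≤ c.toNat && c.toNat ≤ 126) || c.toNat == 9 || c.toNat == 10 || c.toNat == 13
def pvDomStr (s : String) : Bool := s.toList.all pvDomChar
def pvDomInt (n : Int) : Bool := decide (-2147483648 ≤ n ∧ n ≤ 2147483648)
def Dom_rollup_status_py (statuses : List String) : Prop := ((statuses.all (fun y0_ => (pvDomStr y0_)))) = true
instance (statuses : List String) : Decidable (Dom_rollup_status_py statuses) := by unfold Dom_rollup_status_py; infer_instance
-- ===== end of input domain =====

-- B replaces A's frequency dictionary and four count-vs-total comparisons with one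
-- short-circuiting all-equal-to-first scan plus a membership test (objective: simpler).

-- ===== PORT A =====
def rollup_status_py (statuses : List String) : String :=
  if statuses = [] then "Not started"
  else
    let counts : PySem.Dict String Int :=
      statuses.foldl (fun d s => d.insert s (d.getD s 0 + 1)) PySem.Dict.empty
    let total : Int := statuses.length
    if counts.getD "Done" 0 = total then "Done"
    else if counts.getD "Not started" 0 = total then "Not started"
    else if counts.getD "Blocked" 0 = total then "Blocked"
    else if counts.getD "Cancelled" 0 = total then "Cancelled"
    else "In progress"

-- ===== PORT B =====
def rollup_status_py_alt (statuses : List String) : String :=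
  match statuses with
  | [] => "Not started"
  | first :: _ =>
    if statuses.all (fun s => s == first) &&
       (first == "Done" || first == "Not started" || first == "Blocked" || first == "Cancelled")
    then first
    else "In progress"

-- ===== PRECONDITION & SPEC =====
def Spec_rollup_status_py (statuses : List String) (out : String) : Prop := out = rollup_status_py_alt statuses
instance (statuses : List String) (out : String) : Decidable (Spec_rollup_status_py statuses out) := by unfold Spec_rollup_status_py; infer_instance

-- ===== CLAIM (what is proved, stated in full; the proofs are below) =====
def Claim_equal_rollup_status_py : Prop := ∀ (statuses : List String), Dom_rollup_status_py statuses → Spec_rollup_status_py statuses (rollup_status_py statuses)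

-- ===== LEMMAS AND PROOFS =====

-- A's counter entry for v equals the total length iff every element equals v.
theorem counter_getD_eq_total_iff (statuses : List String) (v : String) :
    ((statuses.foldl (fun d s => d.insert s (d.getD s 0 + 1)) PySem.Dict.empty).getD v 0
        = (statuses.length : Int))
    ↔ (∀ s ∈ statuses, s = v) := by
  rw [PySem.Dict.foldl_insert_getD_add_one_eq_counter, PySem.Dict.getD_counter]
  constructor
  · intro h s hs
    have hc : statuses.count v = statuses.length := by exact_mod_cast h
    exact (List.count_eq_length.mp hc s hs).symm
  · intro h
    have hc : statuses.count v = statuses.length :=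
      List.count_eq_length.mpr (fun b hb => (h b hb).symm)
    exact_mod_cast hc

theorem rollup_main (statuses : List String) :
    rollup_status_py statuses = rollup_status_py_alt statuses := by
  cases statuses with
  | nil => rfl
  | cons first rest =>
    unfold rollup_status_py rollup_status_py_alt
    simp only [if_neg (List.cons_ne_nil first rest)]
    by_cases hall : ∀ s ∈ first :: rest, s = first
    · have hf : first = first := rfl
      have hfirst : first ∈ first :: rest := List.mem_cons_self
      have hall' : (first :: rest).all (fun s => s == first) = true := by
        simp only [List.all_eq_true, beq_iff_eq]; exact hall
      rw [hall']
      by_cases hd : first = "Done"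
      · subst hd
        rw [if_pos ((counter_getD_eq_total_iff _ _).mpr hall)]
        simp
      · rw [if_neg (fun h => hd ((counter_getD_eq_total_iff _ _).mp h first hfirst))]
        by_cases hn : first = "Not started"
        · subst hn
          rw [if_pos ((counter_getD_eq_total_iff _ _).mpr hall)]
          simp
        · rw [if_neg (fun h => hn ((counter_getD_eq_total_iff _ _).mp h first hfirst))]
          by_cases hb : first = "Blocked"
          · subst hb
            rw [if_pos ((counter_getD_eq_total_iff _ _).mpr hall)]
            simp
          · rw [if_neg (fun h => hb ((counter_getD_eq_total_iff _ _).mp h first hfirst))]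
            by_cases hc : first = "Cancelled"
            · subst hc
              rw [if_pos ((counter_getD_eq_total_iff _ _).mpr hall)]
              simp
            · rw [if_neg (fun h => hc ((counter_getD_eq_total_iff _ _).mp h first hfirst))]
              have : (first == "Done" || first == "Not started" || first == "Blocked"
                  || first == "Cancelled") = false := by
                simp only [Bool.or_eq_false_iff, beq_eq_false_iff_ne, ne_eq]
                exact ⟨⟨⟨hd, hn⟩, hb⟩, hc⟩
              rw [this, Bool.and_false, if_neg (by simp)]
    · have hall' : (first :: rest).all (fun s => s == first) = false := by
        apply Bool.eq_false_iff.mpr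
        intro h
        exact hall (by simpa [List.all_eq_true] using h)
      have notv : ∀ v : String, ¬ ∀ s ∈ first :: rest, s = v := by
        intro v hv
        exact hall (fun s hs => by
          rw [hv s hs, hv first List.mem_cons_self])
      rw [if_neg (fun h => notv _ ((counter_getD_eq_total_iff _ _).mp h))]
      rw [if_neg (fun h => notv _ ((counter_getD_eq_total_iff _ _).mp h))]
      rw [if_neg (fun h => notv _ ((counter_getD_eq_total_iff _ _).mp h))]
      rw [if_neg (fun h => notv _ ((counter_getD_eq_total_iff _ _).mp h))]
      rw [hall', Bool.false_and, if_neg (by simp)]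

-- ===== VERDICT (by name: the statement is the Claim_ definition above) =====
theorem rollup_status_py_spec : Claim_equal_rollup_status_py := by
  intro statuses _
  exact rollup_main statuses
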